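-- pv_equiv track=rewrite | github.com/Ashiq-am/Path-of-Python | 3.Data Types/Arrays Set 1 and Set 2/Prefix/Minimize length of prefix of string S containing all characters of another string T/Minimize length of prefix of string S containing all characters of another string T.py | getPrefixLength
-- ===== SOURCE A (Python) =====
-- def getPrefixLength(srcStr, targetStr):
--
-- 	# Base Case - if T is empty,
-- 	# it matches 0 length prefix
-- 	if(len(targetStr) == 0):
-- 		return 0
--
-- 	# Convert strings to lower
-- 	# case for uniformity
-- 	srcStr = srcStr.lower()
-- 	targetStr = targetStr.lower()
--
-- 	dictCount = dict([])
-- 	nUnique = 0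
--
-- 	# Update dictCount to the
-- 	# letter count of T
-- 	for ch in targetStr:
--
-- 		# If new character is found,
-- 		# initialize its entry,
-- 		# and increase nUnique
-- 		if(ch not in dictCount):
-- 			nUnique += 1
-- 			dictCount[ch] = 0
--
-- 		# Increase count of ch
-- 		dictCount[ch] += 1
--
-- 	# Iterate from 0 to N
-- 	for i in range(len(srcStr)):
--
-- 		# i-th character
-- 		ch = srcStr[i]
--
-- 		# Skip if ch not in targetStr
-- 		if(ch not in dictCount):
-- 			continue
-- 		# Decrease Count
-- 		dictCount[ch] -= 1
--
-- 		# If the count of ch reaches 0,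
-- 		# we do not need more ch,
-- 		# and can decrease nUnique
-- 		if(dictCount[ch] == 0):
-- 			nUnique -= 1
--
-- 		# If nUnique reaches 0,
-- 		# we have found required prefix
-- 		if(nUnique == 0):
-- 			return (i + 1)
--
-- 	# Otherwise
-- 	return -1
-- ===== SOURCE B (Python) =====
-- def getPrefixLength(srcStr, targetStr):
--     # Occurrence-index algorithm: record every position of each character of S,
--     # then the answer is the max over T's distinct chars (with multiplicity k)
--     # of the k-th occurrence position + 1, or -1 if some char lacks occurrences.
--     targetStr = targetStr.lower()
--     if len(targetStr) == 0:
--         return 0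
--     srcStr = srcStr.lower()
--     positions = {}
--     for i, ch in enumerate(srcStr):
--         positions.setdefault(ch, []).append(i)
--     need = {}
--     for ch in targetStr:
--         need[ch] = need.get(ch, 0) + 1
--     best = 0
--     for ch, k in need.items():
--         occ = positions.get(ch, [])
--         if len(occ) < k:
--             return -1
--         best = max(best, occ[k - 1] + 1)
--     return best
-- ===== Notes on version B (the rewrite author's own statement) =====
-- stated objective: alternative
-- what changed: Replaces A's sequential scan with decrementing per-char counters and a unique-chars-remaining counter by an occurrence-index algorithm: build a char->positions index of S in one pass, then the answer is the maximum over T's distinct characters (needed k times) of the k-th occurrence position + 1, or -1 if some character has fewer than k occurrences.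
import Mathlib
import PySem

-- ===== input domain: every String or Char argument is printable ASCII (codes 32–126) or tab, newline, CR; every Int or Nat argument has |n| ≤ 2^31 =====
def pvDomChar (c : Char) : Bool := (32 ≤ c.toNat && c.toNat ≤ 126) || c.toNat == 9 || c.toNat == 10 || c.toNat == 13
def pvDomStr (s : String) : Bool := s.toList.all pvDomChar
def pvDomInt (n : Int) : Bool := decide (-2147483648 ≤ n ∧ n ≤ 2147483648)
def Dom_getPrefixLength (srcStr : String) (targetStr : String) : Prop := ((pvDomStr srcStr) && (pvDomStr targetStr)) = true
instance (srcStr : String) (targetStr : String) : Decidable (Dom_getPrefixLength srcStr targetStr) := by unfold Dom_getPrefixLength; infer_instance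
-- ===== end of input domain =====

-- B replaces A's counter-decrementing scan by an occurrence-index algorithm (char -> positions of S,
-- answer = max over T's needed chars of the k-th occurrence position + 1); alternative decomposition, same asymptotic cost.

-- ===== PORT A =====
-- the 'for i in range(len(srcStr))' loop with its early return (i + 1)
def aLoop (s : List Char) (d : PySem.Dict Char Int) (nU : Int) : List Int → Int
  | [] => -1
  | i :: is =>
    -- ch = srcStr[i]; i ∈ range(len(srcStr)) is always in range, the default is never read
    let ch := (PySem.List.pyGet? s i).getD ' '
    if d.contains ch = false then aLoop s d nU is
    else
      let d' := d.modify ch 0 (· - 1)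
      let nU' := if d'.getD ch 0 = 0 then nU - 1 else nU
      if nU' = 0 then i + 1 else aLoop s d' nU' is

def getPrefixLength (srcStr : String) (targetStr : String) : Int :=
  if PySem.Str.len targetStr = 0 then 0
  else
    let srcStr := PySem.Str.lower srcStr
    let targetStr := PySem.Str.lower targetStr
    -- dictCount / nUnique building loop over targetStr
    let st := targetStr.toList.foldl (fun (p : PySem.Dict Char Int × Int) ch =>
      let p := if p.1.contains ch then p else (p.1.insert ch 0, p.2 + 1)
      (p.1.modify ch 0 (· + 1), p.2)) (PySem.Dict.empty, 0)
    aLoop srcStr.toList st.1 st.2 (PySem.List.pyRange 0 (PySem.Str.len srcStr) 1)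

-- ===== PORT B =====
-- the 'for ch, k in need.items()' loop with its early return -1
def bLoop (positions : PySem.Dict Char (List Int)) : List (Char × Int) → Int → Int
  | [], best => best
  | (ch, k) :: rest, best =>
    let occ := positions.getD ch []
    if (occ.length : Int) < k then -1
    else
      -- occ[k - 1]; guarded by k ≤ len(occ) (and k ≥ 1), always in range, the default is never read
      bLoop positions rest (max best ((PySem.List.pyGet? occ (k - 1)).getD 0 + 1))

def getPrefixLength_alt (srcStr : String) (targetStr : String) : Int :=
  let targetStr := PySem.Str.lower targetStr
  if PySem.Str.len targetStr = 0 then 0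
  else
    let srcStr := PySem.Str.lower srcStr
    -- positions.setdefault(ch, []).append(i)  ==  positions[ch] = positions.get(ch, []) + [i]
    let positions := (PySem.List.enumerate srcStr.toList 0).foldl
      (fun d p => d.modify p.2 [] (· ++ [p.1])) PySem.Dict.empty
    let need := targetStr.toList.foldl
      (fun d ch => d.insert ch (d.getD ch 0 + 1)) PySem.Dict.empty
    bLoop positions need.items 0

-- ===== PRECONDITION & SPEC =====
def Spec_getPrefixLength (srcStr : String) (targetStr : String) (out : Int) : Prop := out = getPrefixLength_alt srcStr targetStr
instance (srcStr : String) (targetStr : String) (out : Int) : Decidable (Spec_getPrefixLength srcStr targetStr out) := by unfold Spec_getPrefixLength; infer_instance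

-- ===== CLAIM (what is proved, stated in full; the proofs are below) =====
def Claim_equal_getPrefixLength : Prop := ∀ (srcStr : String) (targetStr : String), Dom_getPrefixLength srcStr targetStr → Spec_getPrefixLength srcStr targetStr (getPrefixLength srcStr targetStr)

-- ===== LEMMAS AND PROOFS =====

-- positions of character c in a list, counting from index i (proof-side model of B's index)
def occA (c : Char) : List Char → Nat → List Nat
  | [], _ => []
  | x :: xs, i => if x = c then i :: occA c xs (i + 1) else occA c xs (i + 1)

-- "the length-L prefix of s covers the multiset of t"
def doneB (s t : List Char) (L : Nat) : Bool := t.all (fun c => t.count c ≤ (s.take L).count c)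

-- the common specification both programs are reduced to: first i ≥ j with doneB (i+1), else -1
def specFind (s t : List Char) (j : Nat) : Int :=
  match (List.range' j (s.length - j)).find? (fun i => doneB s t (i + 1)) with
  | some i => (i : Int) + 1
  | none => -1

theorem count_take_succ {s : List Char} {j : Nat} (h : j < s.length) (c : Char) :
    (s.take (j + 1)).count c = (s.take j).count c + (if s[j] = c then 1 else 0) := by
  rw [List.take_succ, List.getElem?_eq_getElem h]
  by_cases hc : s[j] = c
  · simp [List.count_append, hc]
  · rw [List.count_append]
    have h0 : List.count c [s[j]] = 0 := by
      rw [List.count_eq_zero]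
      simp [Ne.symm hc]
    simp [h0, hc]

theorem count_take_mono (s : List Char) (c : Char) {L1 L2 : Nat} (h : L1 ≤ L2) :
    (s.take L1).count c ≤ (s.take L2).count c := by
  have h1 : s.take L1 = (s.take L2).take L1 := by rw [List.take_take, Nat.min_eq_left h]
  rw [h1]
  exact (List.take_sublist L1 (s.take L2)).count_le c

theorem doneB_eq_false_iff (s t : List Char) (L : Nat) :
    doneB s t L = false ↔ ∃ c ∈ t, (s.take L).count c < t.count c := by
  simp [doneB, List.all_eq_false, Nat.not_le]

theorem filter_nil_iff (s t : List Char) (L : Nat) :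
    ((PySem.Set.ofList t).filter (fun c => decide ((s.take L).count c < t.count c))) = [] ↔
    doneB s t L = true := by
  rw [List.filter_eq_nil_iff]
  simp [doneB, List.all_eq_true, PySem.Set.mem_ofList, Nat.not_lt]

theorem filter_len_drop {l : List Char} (hl : l.Nodup) {p q : Char → Bool} {a : Char}
    (ha : a ∈ l) (hp : p a = true) (hq : q a = false) (hpq : ∀ x ∈ l, x ≠ a → p x = q x) :
    (l.filter q).length + 1 = (l.filter p).length := by
  induction l with
  | nil => cases ha
  | cons x xs ih =>
    have hnd := List.nodup_cons.mp hl
    rcases List.mem_cons.mp ha with rfl | hx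
    · have hqp : ∀ y ∈ xs, q y = p y := fun y hy =>
        (hpq y (List.mem_cons_of_mem _ hy) (by rintro rfl; exact hnd.1 hy)).symm
      rw [List.filter_cons_of_neg (by simp [hq]), List.filter_cons_of_pos (by simp [hp]),
        List.filter_congr hqp]
      simp
    · have hne : x ≠ a := by rintro rfl; exact hnd.1 hx
      have hx' : p x = q x := hpq x (by simp) hne
      have ihh := ih hnd.2 hx (fun y hy => hpq y (List.mem_cons_of_mem _ hy))
      by_cases hpx : p x = true
      · rw [List.filter_cons_of_pos (p := q) (by rw [← hx']; exact hpx),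
          List.filter_cons_of_pos hpx]
        simpa using ihh
      · rw [List.filter_cons_of_neg (p := q) (by rw [← hx']; exact hpx),
          List.filter_cons_of_neg hpx]
        exact ihh

theorem contains_append_singleton (xs : List Char) (x c : Char) :
    (xs ++ [x]).contains c = (c == x || xs.contains c) := by
  by_cases hm : c ∈ xs <;> by_cases hcx : c = x <;> simp [hm, hcx]

theorem initA (l : List Char) :
    (∀ c, (l.foldl (fun (p : PySem.Dict Char Int × Int) ch =>
      let p := if p.1.contains ch then p else (p.1.insert ch 0, p.2 + 1)
      (p.1.modify ch 0 (· + 1), p.2)) (PySem.Dict.empty, 0)).1.contains c = l.contains c) ∧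
    (∀ c, (l.foldl (fun (p : PySem.Dict Char Int × Int) ch =>
      let p := if p.1.contains ch then p else (p.1.insert ch 0, p.2 + 1)
      (p.1.modify ch 0 (· + 1), p.2)) (PySem.Dict.empty, 0)).1.getD c 0 = (l.count c : Int)) ∧
    (l.foldl (fun (p : PySem.Dict Char Int × Int) ch =>
      let p := if p.1.contains ch then p else (p.1.insert ch 0, p.2 + 1)
      (p.1.modify ch 0 (· + 1), p.2)) (PySem.Dict.empty, 0)).2 = ((PySem.Set.ofList l).length : Int) := by
  induction l using List.reverseRecOn with
  | nil =>
    refine ⟨fun c => by simp [pysem], fun c => by simp [pysem], by simp [PySem.Set.ofList_eq_foldl]⟩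
  | append_singleton xs x ih =>
    obtain ⟨ih1, ih2, ih3⟩ := ih
    simp only [List.foldl_append, List.foldl_cons, List.foldl_nil]
    have hofl : PySem.Set.ofList (xs ++ [x]) = PySem.Set.add (PySem.Set.ofList xs) x := by
      rw [PySem.Set.ofList_eq_foldl, List.foldl_append, ← PySem.Set.ofList_eq_foldl]
      simp
    by_cases hx : x ∈ xs
    · have hc : (xs.foldl (fun (p : PySem.Dict Char Int × Int) ch =>
        let p := if p.1.contains ch then p else (p.1.insert ch 0, p.2 + 1)
        (p.1.modify ch 0 (· + 1), p.2)) (PySem.Dict.empty, 0)).1.contains x = true := by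
        rw [ih1]; simpa using hx
      have hcntapp : ∀ c : Char, (xs ++ [x]).count c = xs.count c + (if c = x then 1 else 0) := by
        intro c
        by_cases hcx : c = x
        · simp [List.count_append, hcx]
        · simp [List.count_append, hcx, List.count_eq_zero.mpr (fun h : c ∈ [x] => hcx (by simpa using h))]
      simp only [hc, if_true]
      refine ⟨fun c => ?_, fun c => ?_, ?_⟩
      · rw [PySem.Dict.contains_modify, ih1, contains_append_singleton]
      · rw [PySem.Dict.getD_modify]
        by_cases hcx : c = x
        · rw [if_pos hcx, ih2, hcx, hcntapp]
          push_cast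
          simp
        · rw [if_neg hcx, ih2, hcntapp]
          simp [hcx]
      · rw [ih3, hofl]
        simp [PySem.Set.add, hx]
    · have hc : (xs.foldl (fun (p : PySem.Dict Char Int × Int) ch =>
        let p := if p.1.contains ch then p else (p.1.insert ch 0, p.2 + 1)
        (p.1.modify ch 0 (· + 1), p.2)) (PySem.Dict.empty, 0)).1.contains x = false := by
        rw [ih1]; simpa using hx
      have hcntapp : ∀ c : Char, (xs ++ [x]).count c = xs.count c + (if c = x then 1 else 0) := by
        intro c
        by_cases hcx : c = x
        · simp [List.count_append, hcx]
        · simp [List.count_append, hcx, List.count_eq_zero.mpr (fun h : c ∈ [x] => hcx (by simpa using h))]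
      simp only [hc, if_false, Bool.false_eq_true]
      refine ⟨fun c => ?_, fun c => ?_, ?_⟩
      · rw [PySem.Dict.contains_modify, PySem.Dict.contains_insert, ih1,
          contains_append_singleton]
        by_cases hcx : c = x <;> simp [hcx]
      · rw [PySem.Dict.getD_modify]
        by_cases hcx : c = x
        · rw [if_pos hcx, hcx, PySem.Dict.getD_insert_self, hcntapp]
          simp [List.count_eq_zero.mpr hx]
        · rw [if_neg hcx]
          have hg : ∀ (st : PySem.Dict Char Int), (st.insert x 0).getD c 0 = st.getD c 0 := by
            intro st
            simp [pysem, hcx]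
          rw [hg, ih2, hcntapp]
          simp [hcx]
      · rw [ih3, hofl]
        simp [PySem.Set.add, hx]
        try push_cast
        try ring
        try push_cast
        try ring

theorem aLoop_eq (s t : List Char) :
    ∀ (n j : Nat) (d : PySem.Dict Char Int) (nU : Int),
    j + n = s.length →
    (∀ c, d.contains c = t.contains c) →
    (∀ c ∈ t, d.getD c 0 = (t.count c : Int) - ((s.take j).count c : Int)) →
    nU = (((PySem.Set.ofList t).filter (fun c => decide ((s.take j).count c < t.count c))).length : Int) →
    doneB s t j = false →
    aLoop s d nU (PySem.List.pyRange (j : Int) (s.length : Int) 1) = specFind s t j := by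
  intro n
  induction n with
  | zero =>
    intro j d nU hj _ _ _ _
    have hj' : j = s.length := by omega
    subst hj'
    rw [PySem.List.pyRange_one_eq_nil (le_refl _)]
    simp [aLoop, specFind]
  | succ n ih =>
    intro j d nU hj hcont hgetD hnU hdone
    have hjlt : j < s.length := by omega
    rw [PySem.List.pyRange_one_cons (by exact_mod_cast hjlt)]
    have hch : (PySem.List.pyGet? s (j : Int)).getD ' ' = s[j] := by
      rw [PySem.List.pyGet?_natCast, List.getElem?_eq_getElem hjlt]
      rfl
    have hcast : ((j : Int) + 1) = ((j + 1 : Nat) : Int) := by push_cast; ring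
    have hspec : specFind s t j =
        if doneB s t (j + 1) = true then (j : Int) + 1 else specFind s t (j + 1) := by
      unfold specFind
      have hrange : s.length - j = (s.length - (j + 1)) + 1 := by omega
      rw [hrange, List.range'_succ]
      by_cases hd1 : doneB s t (j + 1) = true
      · rw [List.find?_cons_of_pos (by simpa using hd1)]
        simp [hd1]
      · rw [List.find?_cons_of_neg (by simpa using hd1)]
        simp [hd1]
    simp only [aLoop, hch]
    rw [hcont s[j]]
    by_cases hmem : s[j] ∈ t
    · -- character is in the target: counter is decremented
      have hct : t.contains s[j] = true := by simpa using hmem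
      rw [hct, if_neg (by simp)]
      have hgx : d.getD s[j] 0 = (t.count s[j] : Int) - ((s.take j).count s[j] : Int) :=
        hgetD _ hmem
      have hgd' : ∀ c, (d.modify s[j] 0 (· - 1)).getD c 0 =
          if c = s[j] then d.getD s[j] 0 - 1 else d.getD c 0 := fun c =>
        PySem.Dict.getD_modify ..
      have hcont' : ∀ c, (d.modify s[j] 0 (· - 1)).contains c = t.contains c := by
        intro c
        rw [PySem.Dict.contains_modify, hcont]
        by_cases hcx : c = s[j] <;> simp [hcx, hmem, hct]
      have hcnt1 : (s.take (j + 1)).count s[j] = (s.take j).count s[j] + 1 := by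
        rw [count_take_succ hjlt]; simp
      have hcnt2 : ∀ c, c ≠ s[j] → (s.take (j + 1)).count c = (s.take j).count c := by
        intro c hc
        rw [count_take_succ hjlt]
        simp [Ne.symm hc]
      by_cases hz : (d.modify s[j] 0 (· - 1)).getD s[j] 0 = 0
      · -- this occurrence completes the needed count of s[j]
        have hv : (t.count s[j] : Int) = ((s.take j).count s[j] : Int) + 1 := by
          rw [hgd', if_pos rfl, hgx] at hz
          omega
        have hvn : t.count s[j] = (s.take j).count s[j] + 1 := by exact_mod_cast hv
        have hdrop : ((PySem.Set.ofList t).filter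
              (fun c => decide ((s.take (j + 1)).count c < t.count c))).length + 1 =
            ((PySem.Set.ofList t).filter
              (fun c => decide ((s.take j).count c < t.count c))).length := by
          refine filter_len_drop (PySem.Set.nodup_ofList t) ((PySem.Set.mem_ofList ..).mpr hmem)
            (by simp [hvn]) (by simp [hcnt1, hvn]) ?_
          intro c _ hc
          rw [hcnt2 c hc]
        rw [if_pos hz]
        by_cases hr : doneB s t (j + 1) = true
        · have hfil : ((PySem.Set.ofList t).filter
              (fun c => decide ((s.take (j + 1)).count c < t.count c))) = [] :=
            (filter_nil_iff s t (j + 1)).mpr hr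
          have : nU - 1 = 0 := by
            rw [hnU]
            rw [hfil] at hdrop
            simp at hdrop
            omega
          rw [if_pos this, hspec, if_pos hr]
        · have hfil : ((PySem.Set.ofList t).filter
              (fun c => decide ((s.take (j + 1)).count c < t.count c))) ≠ [] := by
            intro e
            exact hr ((filter_nil_iff s t (j + 1)).mp e)
          have hpos : 0 < ((PySem.Set.ofList t).filter
              (fun c => decide ((s.take (j + 1)).count c < t.count c))).length :=
            List.length_pos_of_ne_nil hfil
          have hne : ¬ (nU - 1 = 0) := by
            rw [hnU]
            omega
          rw [if_neg hne, hspec, if_neg hr, hcast]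
          apply ih (j + 1) _ _ (by omega) hcont'
          · intro c hc
            rw [hgd']
            by_cases hcx : c = s[j]
            · subst hcx
              rw [if_pos rfl, hgx, hcnt1]
              push_cast
              ring
            · rw [if_neg hcx, hgetD c hc, hcnt2 c hcx]
          · rw [hnU]
            omega
          · simpa using hr
      · -- the needed count of s[j] is not completed exactly now (still missing, or already over-full)
        have hv : (t.count s[j] : Int) ≠ ((s.take j).count s[j] : Int) + 1 := by
          rw [hgd', if_pos rfl, hgx] at hz
          omega
        have hvn : t.count s[j] ≠ (s.take j).count s[j] + 1 := by exact_mod_cast hv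
        have hfeq : ((PySem.Set.ofList t).filter
              (fun c => decide ((s.take (j + 1)).count c < t.count c))) =
            ((PySem.Set.ofList t).filter
              (fun c => decide ((s.take j).count c < t.count c))) := by
          apply List.filter_congr
          intro c _
          by_cases hcx : c = s[j]
          · rw [hcx, hcnt1]
            have h2 : ((s.take j).count s[j] + 1 < t.count s[j]) ↔
                ((s.take j).count s[j] < t.count s[j]) := by omega
            simp [h2]
          · rw [hcnt2 c hcx]
        have hfne : ((PySem.Set.ofList t).filter
            (fun c => decide ((s.take j).count c < t.count c))) ≠ [] := by
          intro e
          rw [(filter_nil_iff s t j).mp e] at hdone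
          cases hdone
        have hpos : 0 < ((PySem.Set.ofList t).filter
            (fun c => decide ((s.take j).count c < t.count c))).length :=
          List.length_pos_of_ne_nil hfne
        rw [if_neg hz]
        have hne : ¬ (nU = 0) := by rw [hnU]; omega
        rw [if_neg hne]
        have hdone' : doneB s t (j + 1) = false := by
          cases h : doneB s t (j + 1) with
          | false => rfl
          | true =>
            exfalso
            apply hfne
            rw [← hfeq]
            exact (filter_nil_iff s t (j + 1)).mpr h
        rw [hspec, if_neg (by simp [hdone']), hcast]
        apply ih (j + 1) _ _ (by omega) hcont'
        · intro c hc
          rw [hgd']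
          by_cases hcx : c = s[j]
          · subst hcx
            rw [if_pos rfl, hgx, hcnt1]
            push_cast
            ring
          · rw [if_neg hcx, hgetD c hc, hcnt2 c hcx]
        · rw [hnU, hfeq]
        · exact hdone'
    · -- character not in the target: nothing changes
      have hcf : t.contains s[j] = false := by simpa using hmem
      rw [hcf, if_pos rfl]
      have hcnt : ∀ c ∈ t, (s.take (j + 1)).count c = (s.take j).count c := by
        intro c hc
        rw [count_take_succ hjlt]
        have : s[j] ≠ c := fun e => hmem (e ▸ hc)
        simp [this]
      have hdone' : doneB s t (j + 1) = false := by
        obtain ⟨c, hc, hlt⟩ := (doneB_eq_false_iff s t j).mp hdone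
        exact (doneB_eq_false_iff s t (j + 1)).mpr ⟨c, hc, by rw [hcnt c hc]; exact hlt⟩
      rw [hspec, if_neg (by simp [hdone']), hcast]
      apply ih (j + 1) _ _ (by omega) hcont
      · intro c hc
        rw [hgetD c hc, hcnt c hc]
      · rw [hnU]
        have hfc := List.filter_congr (l := PySem.Set.ofList t)
          (p := fun c => decide ((s.take (j + 1)).count c < t.count c))
          (q := fun c => decide ((s.take j).count c < t.count c))
          (fun c hc => by simp only [hcnt c ((PySem.Set.mem_ofList ..).mp hc)])
        rw [hfc]
      · exact hdone'

theorem occA_length (c : Char) : ∀ (xs : List Char) (i : Nat), (occA c xs i).length = xs.count c := by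
  intro xs
  induction xs with
  | nil => intro i; simp [occA]
  | cons x tl ih =>
    intro i
    by_cases hxc : x = c <;> simp [occA, hxc, ih, List.count_cons]

theorem occA_shift (c : Char) : ∀ (xs : List Char) (i : Nat),
    occA c xs (i + 1) = (occA c xs i).map (· + 1) := by
  intro xs
  induction xs with
  | nil => intro i; simp [occA]
  | cons x tl ih =>
    intro i
    by_cases hxc : x = c <;> simp [occA, hxc, ih]

theorem occA_get (c : Char) : ∀ (s : List Char) (k p : Nat), (occA c s 0)[k]? = some p →
    (s.take p).count c = k ∧ p < s.length ∧ s[p]? = some c := by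
  intro s
  induction s with
  | nil => intro k p hp; simp [occA] at hp
  | cons x xs ih =>
    intro k p hp
    by_cases hxc : x = c
    · rw [show occA c (x :: xs) 0 = 0 :: occA c xs (0 + 1) from by simp [occA, hxc],
        occA_shift] at hp
      cases k with
      | zero =>
        simp at hp
        subst hp
        simp [hxc]
      | succ k =>
        simp only [List.getElem?_cons_succ, List.getElem?_map] at hp
        rcases Option.map_eq_some_iff.mp hp with ⟨p', hp', rfl⟩
        obtain ⟨h1, h2, h3⟩ := ih k p' hp'
        refine ⟨?_, by simpa using h2, by simpa using h3⟩
        simp [List.count_cons, h1, hxc, Nat.add_comm]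
    · rw [show occA c (x :: xs) 0 = occA c xs (0 + 1) from by simp [occA, hxc],
        occA_shift] at hp
      simp only [List.getElem?_map] at hp
      rcases Option.map_eq_some_iff.mp hp with ⟨p', hp', rfl⟩
      obtain ⟨h1, h2, h3⟩ := ih k p' hp'
      refine ⟨?_, by simpa using h2, by simpa using h3⟩
      simp [List.count_cons, h1, hxc]

theorem pos_getD (s : List Char) (c : Char) :
    ((PySem.List.enumerate s 0).foldl (fun d p => d.modify p.2 [] (· ++ [p.1]))
      PySem.Dict.empty).getD c [] = (occA c s 0).map (fun n : Nat => (n : Int)) := by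
  have key : ∀ (xs : List Char) (j : Nat),
      (((PySem.List.enumerate xs (j : Int)).map (fun p => (p.2, p.1))).filter
        (fun q => q.1 == c)).map (·.2) = (occA c xs j).map (fun n : Nat => (n : Int)) := by
    intro xs
    induction xs with
    | nil => intro j; simp [PySem.List.enumerate_nil, occA]
    | cons x tl ih =>
      intro j
      rw [PySem.List.enumerate_cons]
      have ih' := ih (j + 1)
      push_cast at ih'
      by_cases hxc : x = c
      · simp [occA, hxc, ih']
      · simp [occA, hxc, ih']
  have hfold : ((PySem.List.enumerate s 0).map (fun p => (p.2, p.1))).foldl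
      (fun d (q : Char × Int) => d.modify q.1 [] (· ++ [q.2])) PySem.Dict.empty =
      (PySem.List.enumerate s 0).foldl (fun d p => d.modify p.2 [] (· ++ [p.1]))
        PySem.Dict.empty := by
    rw [List.foldl_map]
  rw [← hfold, PySem.Dict.getD_foldl_modify_append]
  have hkey := key s 0
  simp only [Nat.cast_zero] at hkey
  rw [hkey]
  simp [pysem]

theorem bLoop_fail (positions : PySem.Dict Char (List Int)) :
    ∀ (items : List (Char × Int)) (best : Int),
    (∃ p ∈ items, ((positions.getD p.1 []).length : Int) < p.2) →
    bLoop positions items best = -1 := by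
  intro items
  induction items with
  | nil => rintro best ⟨p, hp, _⟩; cases hp
  | cons q rest ih =>
    rintro best ⟨p, hp, hlt⟩
    obtain ⟨ch, k⟩ := q
    simp only [bLoop]
    rcases List.mem_cons.mp hp with rfl | hp'
    · simp [hlt]
    · split
      · rfl
      · exact ih _ ⟨p, hp', hlt⟩

theorem bLoop_pass (positions : PySem.Dict Char (List Int)) :
    ∀ (items : List (Char × Int)) (best : Int),
    (∀ p ∈ items, ¬ (((positions.getD p.1 []).length : Int) < p.2)) →
    bLoop positions items best =
      (items.map (fun p =>
        (PySem.List.pyGet? (positions.getD p.1 []) (p.2 - 1)).getD 0 + 1)).foldl max best := by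
  intro items
  induction items with
  | nil => intro best _; simp [bLoop]
  | cons q rest ih =>
    intro best hall
    obtain ⟨ch, k⟩ := q
    have h1 := hall (ch, k) (by simp)
    simp only [bLoop, List.map_cons, List.foldl_cons]
    rw [if_neg h1]
    exact ih _ (fun p hp => hall p (List.mem_cons_of_mem _ hp))

theorem find?_range'_first (Q : Nat → Bool) (m : Nat) :
    ∀ (k a : Nat), a ≤ m → m < a + k → Q m = true → (∀ i, a ≤ i → i < m → Q i = false) →
    (List.range' a k).find? Q = some m := by
  intro k
  induction k with
  | zero => intro a h1 h2 _ _; omega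
  | succ k ih =>
    intro a h1 h2 hQ hlt
    rw [List.range'_succ]
    rcases Nat.eq_or_lt_of_le h1 with rfl | hlt'
    · exact List.find?_cons_of_pos hQ
    · rw [List.find?_cons_of_neg (by simp [hlt a (le_refl a) hlt'])]
      exact ih (a + 1) hlt' (by omega) hQ (fun i hi h2 => hlt i (by omega) h2)

theorem bSide (s t : List Char) (ht : t ≠ []) :
    bLoop ((PySem.List.enumerate s 0).foldl (fun d p => d.modify p.2 [] (· ++ [p.1]))
        PySem.Dict.empty)
      (t.foldl (fun d ch => d.insert ch (d.getD ch 0 + 1)) PySem.Dict.empty).items 0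
    = specFind s t 0 := by
  rw [PySem.Dict.foldl_insert_getD_add_one_eq_counter, PySem.Dict.items_counter]
  have hPg : ∀ c, ((PySem.List.enumerate s 0).foldl (fun d p => d.modify p.2 [] (· ++ [p.1]))
      PySem.Dict.empty).getD c [] = (occA c s 0).map (fun n : Nat => (n : Int)) := fun c => pos_getD s c
  have hPlen : ∀ c, (((PySem.List.enumerate s 0).foldl (fun d p => d.modify p.2 [] (· ++ [p.1]))
      PySem.Dict.empty).getD c []).length = s.count c := fun c => by
    rw [hPg]
    simp [occA_length]
  by_cases hd : doneB s t s.length = true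
  · -- every needed character occurs often enough in s
    have hcover : ∀ c ∈ t, t.count c ≤ s.count c := by
      intro c hc
      have hall := hd
      simp only [doneB, List.all_eq_true, decide_eq_true_eq] at hall
      simpa using hall c hc
    have hpass : ∀ p ∈ (PySem.Set.ofList t).map (fun k => (k, (t.count k : Int))),
        ¬ ((((PySem.List.enumerate s 0).foldl (fun d p => d.modify p.2 [] (· ++ [p.1]))
          PySem.Dict.empty).getD p.1 []).length : Int) < p.2 := by
      rintro p hp
      rcases List.mem_map.mp hp with ⟨c, hc, rfl⟩
      rw [not_lt]
      simp only [hPlen]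
      exact_mod_cast hcover c ((PySem.Set.mem_ofList ..).mp hc)
    rw [bLoop_pass _ _ _ hpass]
    have hvals : ∀ c ∈ t, ∃ pc : Nat,
        (PySem.List.pyGet? (((PySem.List.enumerate s 0).foldl
            (fun d p => d.modify p.2 [] (· ++ [p.1])) PySem.Dict.empty).getD c [])
          ((t.count c : Int) - 1)).getD 0 = (pc : Int) ∧
        (s.take pc).count c = t.count c - 1 ∧ pc < s.length ∧ s[pc]? = some c := by
      intro c hc
      have hc1 : 0 < t.count c := List.count_pos_iff.mpr hc
      have hlt : t.count c - 1 < (occA c s 0).length := by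
        rw [occA_length]
        have := hcover c hc
        omega
      have hpc : (occA c s 0)[t.count c - 1]? = some ((occA c s 0)[t.count c - 1]'hlt) :=
        List.getElem?_eq_getElem hlt
      obtain ⟨h1, h2, h3⟩ := occA_get c s (t.count c - 1) _ hpc
      refine ⟨(occA c s 0)[t.count c - 1]'hlt, ?_, h1, h2, h3⟩
      rw [hPg]
      have hcast : (t.count c : Int) - 1 = ((t.count c - 1 : Nat) : Int) := by omega
      rw [hcast, PySem.List.pyGet?_natCast, List.getElem?_map, hpc]
      simp
    set L := ((PySem.Set.ofList t).map (fun k => (k, (t.count k : Int)))).map (fun p =>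
      (PySem.List.pyGet? (((PySem.List.enumerate s 0).foldl
        (fun d p => d.modify p.2 [] (· ++ [p.1])) PySem.Dict.empty).getD p.1 [])
        (p.2 - 1)).getD 0 + 1) with hL
    have hmemL : ∀ c ∈ t, ∀ pc : Nat,
        (PySem.List.pyGet? (((PySem.List.enumerate s 0).foldl
            (fun d p => d.modify p.2 [] (· ++ [p.1])) PySem.Dict.empty).getD c [])
          ((t.count c : Int) - 1)).getD 0 = (pc : Int) → ((pc : Int) + 1) ∈ L := by
      intro c hc pc hgc
      rw [hL]
      refine List.mem_map.mpr ⟨(c, (t.count c : Int)),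
        List.mem_map.mpr ⟨c, (PySem.Set.mem_ofList ..).mpr hc, rfl⟩, by simp [hgc]⟩
    have hLb := PySem.List.le_foldl_max L 0
    obtain ⟨pc1, hpc1g, _, _, _⟩ := hvals (t.head ht) (List.head_mem ht)
    have hM1 : 1 ≤ L.foldl max 0 := by
      have := hLb.2 _ (hmemL (t.head ht) (List.head_mem ht) pc1 hpc1g)
      omega
    have hMmem : L.foldl max 0 ∈ L := by
      rcases PySem.List.foldl_max_mem L 0 with h | h
      · omega
      · exact h
    rw [hL] at hMmem
    rcases List.mem_map.mp hMmem with ⟨q, hq, hqe⟩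
    rcases List.mem_map.mp hq with ⟨c0, hc0, rfl⟩
    have hc0t : c0 ∈ t := (PySem.Set.mem_ofList ..).mp hc0
    obtain ⟨p0, h0g, h0a, h0b, h0c⟩ := hvals c0 hc0t
    have hqe' : L.foldl max 0 = (p0 : Int) + 1 := by
      rw [← hqe]
      simp [h0g]
    have hfind : (List.range' 0 (s.length - 0)).find? (fun i => doneB s t (i + 1)) = some p0 := by
      apply find?_range'_first _ p0 (s.length - 0) 0 (Nat.zero_le _) (by omega)
      · -- the prefix of length p0 + 1 covers t
        simp only [doneB, List.all_eq_true, decide_eq_true_eq]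
        intro c hc
        obtain ⟨pc, hgc, hca, hcb, hcc⟩ := hvals c hc
        have hvle : (pc : Int) + 1 ≤ (p0 : Int) + 1 := by
          rw [← hqe']
          exact hLb.2 _ (hmemL c hc pc hgc)
        have hple : pc ≤ p0 := by exact_mod_cast (by omega : (pc : Int) ≤ (p0 : Int))
        have hsc : s[pc] = c := by
          rw [List.getElem?_eq_getElem hcb] at hcc
          exact Option.some.inj hcc
        have h5 : (s.take (pc + 1)).count c = t.count c := by
          rw [count_take_succ hcb, hca, if_pos hsc]
          have := List.count_pos_iff.mpr hc
          omega
        calc t.count c = (s.take (pc + 1)).count c := h5.symm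
          _ ≤ (s.take (p0 + 1)).count c := count_take_mono s c (by omega)
      · -- no shorter prefix covers t: c0 occurs too few times
        intro i _ hi
        apply (doneB_eq_false_iff s t (i + 1)).mpr
        refine ⟨c0, hc0t, ?_⟩
        have hmono : (s.take (i + 1)).count c0 ≤ (s.take p0).count c0 :=
          count_take_mono s c0 (by omega)
        rw [h0a] at hmono
        have := List.count_pos_iff.mpr hc0t
        omega
    unfold specFind
    rw [hfind]
    exact hqe'
  · -- some needed character is too rare anywhere in s: both sides give -1
    have hfalse : doneB s t s.length = false := by
      cases h : doneB s t s.length with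
      | false => rfl
      | true => exact absurd h hd
    obtain ⟨c, hc, hlt⟩ := (doneB_eq_false_iff s t s.length).mp hfalse
    have hlt' : s.count c < t.count c := by simpa [List.take_length] using hlt
    rw [bLoop_fail _ _ _ ⟨(c, (t.count c : Int)),
      List.mem_map.mpr ⟨c, (PySem.Set.mem_ofList ..).mpr hc, rfl⟩, by
        simp only [hPlen]
        exact_mod_cast hlt'⟩]
    have hnone : (List.range' 0 (s.length - 0)).find? (fun i => doneB s t (i + 1)) = none := by
      apply List.find?_eq_none.mpr
      intro i _
      simp only [Bool.not_eq_true]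
      apply (doneB_eq_false_iff s t (i + 1)).mpr
      refine ⟨c, hc, ?_⟩
      have : (s.take (i + 1)).count c ≤ s.count c := (List.take_sublist _ _).count_le c
      omega
    unfold specFind
    rw [hnone]

-- ===== VERDICT (by name: the statement is the Claim_ definition above) =====
theorem getPrefixLength_spec : Claim_equal_getPrefixLength := by
  intro srcStr targetStr _
  unfold Spec_getPrefixLength
  simp only [getPrefixLength, getPrefixLength_alt]
  have hlen : PySem.Str.len (PySem.Str.lower targetStr) = PySem.Str.len targetStr := by
    simp [PySem.Str.len_eq, PySem.Str.toList_lower, PySem.Chars.lower]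
  by_cases h0 : PySem.Str.len targetStr = 0
  · rw [if_pos h0, if_pos (by rw [hlen]; exact h0)]
  · rw [if_neg h0, if_neg (by rw [hlen]; exact h0)]
    have htne : (PySem.Str.lower targetStr).toList ≠ [] := by
      intro e
      apply h0
      rw [← hlen, PySem.Str.len_eq]
      simp [e]
    obtain ⟨i1, i2, i3⟩ := initA (PySem.Str.lower targetStr).toList
    have hdone0 : doneB (PySem.Str.lower srcStr).toList (PySem.Str.lower targetStr).toList 0
        = false := by
      apply (doneB_eq_false_iff _ _ 0).mpr
      rcases List.exists_cons_of_ne_nil htne with ⟨c1, t1, he⟩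
      refine ⟨c1, by rw [he]; simp, ?_⟩
      rw [he]
      simp
    have hA := aLoop_eq (PySem.Str.lower srcStr).toList (PySem.Str.lower targetStr).toList
      ((PySem.Str.lower srcStr).toList.length) 0
      (((PySem.Str.lower targetStr).toList.foldl (fun (p : PySem.Dict Char Int × Int) ch =>
        let p := if p.1.contains ch then p else (p.1.insert ch 0, p.2 + 1)
        (p.1.modify ch 0 (· + 1), p.2)) (PySem.Dict.empty, 0)).1)
      (((PySem.Str.lower targetStr).toList.foldl (fun (p : PySem.Dict Char Int × Int) ch =>
        let p := if p.1.contains ch then p else (p.1.insert ch 0, p.2 + 1)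
        (p.1.modify ch 0 (· + 1), p.2)) (PySem.Dict.empty, 0)).2)
      (by omega) i1
      (fun c _ => by rw [i2]; simp)
      (by
        rw [i3]
        have hfs : ((PySem.Set.ofList (PySem.Str.lower targetStr).toList).filter
            (fun c => decide (((PySem.Str.lower srcStr).toList.take 0).count c <
              (PySem.Str.lower targetStr).toList.count c))) =
            PySem.Set.ofList (PySem.Str.lower targetStr).toList := by
          apply List.filter_eq_self.mpr
          intro c hc
          simp only [List.take_zero, List.count_nil, decide_eq_true_eq]
          exact List.count_pos_iff.mpr ((PySem.Set.mem_ofList ..).mp hc)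
        rw [hfs])
      hdone0
    have h00 : ((0 : Nat) : Int) = 0 := by norm_num
    rw [h00] at hA
    rw [PySem.Str.len_eq, hA, bSide _ _ htne]
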